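-- pv_equiv track=rewrite | github.com/Arsen1302/Code-copy-detector | TestData/solutions/problem_713_5_1.py | solution_713_5_1
-- ===== SOURCE A (Python) =====
-- from typing import List
--
-- def solution_713_5_1(grid: List[List[int]], row: int, col: int, color: int) -> List[List[int]]:
--     def solution_713_5_2(mat, i, j, been, colour, center):
--         if 0 <= i+1 < len(mat) and 0 <= i-1 < len(mat) and 0 <= j+1 < len(mat[i]) and 0 <= j-1 < len(mat[i]): # checking for a center
--             if mat[i+1][j] == mat[i-1][j] == mat[i][j+1] == mat[i][j-1] == colour[0]:
--                 center.add((i, j))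
--         if (i, j) not in been:
--             been.add((i, j))
--         if 0 <= i+1 < len(mat) and mat[i+1][j] == colour[0] and (i+1, j) not in been:
--             been.add((i+1, j))
--             solution_713_5_2(mat, i+1, j, been, colour, center)
--         if 0 <= i-1 < len(mat) and mat[i-1][j] == colour[0] and (i-1, j) not in been:
--             been.add((i-1, j))
--             solution_713_5_2(mat, i-1, j, been, colour, center)
--         if 0 <= j+1 < len(mat[i]) and mat[i][j+1] == colour[0] and (i, j+1) not in been:
--             been.add((i, j+1))
--             solution_713_5_2(mat, i, j+1, been, colour, center)
--         if 0 <= j-1 < len(mat[i]) and mat[i][j-1] == colour[0] and (i, j-1) not in been: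
--             been.add((i, j-1))
--             solution_713_5_2(mat, i, j-1, been, colour, center)
--
--
--     been = set() # the surface which has to be painted
--     center = set() # center of the surface
--     colour = {1: -1, 0: -1} # a dictionary with the original colour and the colour which has to be used
--     for i in range(len(grid)):
--         for j in range(len(grid[i])):
--             if i == row and j == col:
--                 colour[0] = grid[i][j] # the original colour
--                 colour[1] = color # colour to implement
--                 solution_713_5_2(grid, i, j, been, colour, center)
--     been = list(been)
--     for i in range(len(been)):
--         if been[i] not in center:
--             grid[been[i][0]][been[i][1]] = colour[1]
--     return grid
-- ===== SOURCE B (Python) =====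
-- # B: iterative stack-based flood fill collecting the component first, then a separate
-- # border pass over the original values; A recurses and records centers during traversal.
-- # Like A, mutates `grid` in place (the returned object is the argument).
-- def solution_713_5_1(grid, row, col, color):
--     if not (0 <= row < len(grid) and 0 <= col < len(grid[row])):
--         return grid
--     orig = grid[row][col]
--     comp = {(row, col)}
--     stack = [(row, col)]
--     while stack:
--         i, j = stack.pop()
--         for n in ((i + 1, j), (i - 1, j), (i, j + 1), (i, j - 1)):
--             ni, nj = n
--             if 0 <= ni < len(grid) and 0 <= nj < len(grid[ni]) and grid[ni][nj] == orig and n not in comp: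
--                 comp.add(n)
--                 stack.append(n)
--
--     def is_center(i, j):
--         return all(0 <= ni < len(grid) and 0 <= nj < len(grid[ni]) and grid[ni][nj] == orig
--                    for ni, nj in ((i + 1, j), (i - 1, j), (i, j + 1), (i, j - 1)))
--
--     border = [c for c in comp if not is_center(*c)]
--     for i, j in border:
--         grid[i][j] = color
--     return grid
-- ===== Notes on version B (the rewrite author's own statement) =====
-- stated objective: alternative
-- what changed: A's recursive DFS that records border/center verdicts during traversal is replaced by an iterative stack-based flood fill that first collects the whole component, then decides centers in a separate pass over the original grid and finally colors the non-center cells.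
-- outside the precondition, e.g. on solution_713_5_1([[1], [2, 3]], 0, 0, 5): A returns [[5], [2, 3]], B returns [[5], [2, 3]]
import Mathlib
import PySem

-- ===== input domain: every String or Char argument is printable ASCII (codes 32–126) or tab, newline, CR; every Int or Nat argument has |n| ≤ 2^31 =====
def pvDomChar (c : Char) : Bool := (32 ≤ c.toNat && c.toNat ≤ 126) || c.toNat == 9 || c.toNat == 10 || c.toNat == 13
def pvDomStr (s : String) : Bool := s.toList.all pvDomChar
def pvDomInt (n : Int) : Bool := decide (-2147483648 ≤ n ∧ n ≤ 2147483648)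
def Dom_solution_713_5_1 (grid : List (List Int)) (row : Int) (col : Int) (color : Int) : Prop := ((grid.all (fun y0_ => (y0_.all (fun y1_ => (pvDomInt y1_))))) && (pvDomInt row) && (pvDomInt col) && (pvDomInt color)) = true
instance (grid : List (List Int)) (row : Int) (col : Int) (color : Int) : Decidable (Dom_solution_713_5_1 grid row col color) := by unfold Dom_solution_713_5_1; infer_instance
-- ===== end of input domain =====

-- B replaces A's recursive DFS (which records centers while it walks) by an iterative
-- stack-based flood fill followed by a separate border pass; both mutate/return the grid
-- (the equivalence proved here is about the RETURN value).

-- shared helpers: grid access (used only under the same non-negative in-bounds guards the Python performs)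
def pvRowA (g : List (List Int)) (i : Int) : List Int := g.getD i.toNat []
def pvAt (g : List (List Int)) (i j : Int) : Int := (pvRowA g i).getD j.toNat 0
-- grid[a][b] = v for a non-negative in-bounds cell (exact there; Python would wrap/raise elsewhere)
def pvSet2 (g : List (List Int)) (c : Int × Int) (v : Int) : List (List Int) :=
  g.set c.1.toNat ((g.getD c.1.toNat []).set c.2.toNat v)

-- ===== PORT A =====
-- A's center test: `0<=i+1<len(mat) and 0<=i-1<len(mat) and 0<=j+1<len(mat[i]) and 0<=j-1<len(mat[i])`
-- then the chained equality of the four neighbour values with colour[0]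
def pvCtrA (g : List (List Int)) (orig i j : Int) : Bool :=
  (decide (0 ≤ i+1 ∧ i+1 < (g.length : Int)) && decide (0 ≤ i-1 ∧ i-1 < (g.length : Int)) &&
   decide (0 ≤ j+1 ∧ j+1 < ((pvRowA g i).length : Int)) && decide (0 ≤ j-1 ∧ j-1 < ((pvRowA g i).length : Int))) &&
  (pvAt g (i+1) j == orig && pvAt g (i-1) j == orig && pvAt g i (j+1) == orig && pvAt g i (j-1) == orig)

-- solution_713_5_2: `been`/`center` are Python sets (PySem.Set, threaded instead of mutated);
-- the four textually identical neighbour blocks share the helper `step` (same tests, same order);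
-- `fuel` only makes the recursion structural — it is never exhausted on Pre_ inputs (proved below).
def pvDfsA (g : List (List Int)) (orig : Int) :
    Nat → Int → Int → List (Int × Int) → List (Int × Int) → List (Int × Int) × List (Int × Int)
  | 0, _, _, been, center => (been, center)
  | fuel+1, i, j, been, center =>
    let step : (Int × Int) × Bool → List (Int × Int) × List (Int × Int) → List (Int × Int) × List (Int × Int) :=
      fun t s =>
        if t.2 && (pvAt g t.1.1 t.1.2 == orig) && !(PySem.Set.contains s.1 t.1) then
          pvDfsA g orig fuel t.1.1 t.1.2 (PySem.Set.add s.1 t.1) s.2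
        else s
    let center1 := if pvCtrA g orig i j then PySem.Set.add center (i, j) else center
    let been1 := if PySem.Set.contains been (i, j) then been else PySem.Set.add been (i, j)
    step ((i, j-1), decide (0 ≤ j-1 ∧ j-1 < ((pvRowA g i).length : Int)))
      (step ((i, j+1), decide (0 ≤ j+1 ∧ j+1 < ((pvRowA g i).length : Int)))
        (step ((i-1, j), decide (0 ≤ i-1 ∧ i-1 < (g.length : Int)))
          (step ((i+1, j), decide (0 ≤ i+1 ∧ i+1 < (g.length : Int)))
            (been1, center1))))

-- the dict colour = {1:-1, 0:-1} is threaded as the pair (colour[0], colour[1]), initially (-1, -1)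
def solution_713_5_1 (grid : List (List Int)) (row : Int) (col : Int) (color : Int) : List (List Int) :=
  let fuel := (grid.map List.length).sum + 1
  let st : (List (Int × Int) × List (Int × Int)) × Int × Int :=
    (PySem.List.pyRange 0 (grid.length : Int) 1).foldl
      (fun (st : (List (Int × Int) × List (Int × Int)) × Int × Int) i =>
        (PySem.List.pyRange 0 ((pvRowA grid i).length : Int) 1).foldl
          (fun st j =>
            if i == row && j == col then
              (pvDfsA grid (pvAt grid i j) fuel i j st.1.1 st.1.2, pvAt grid i j, color)
            else st) st)
      (([], []), (-1 : Int), (-1 : Int))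
  -- been = list(been); for i in range(len(been)): if been[i] not in center: grid[...] = colour[1]
  -- (Python iterates the set in hash order; the written cells are distinct and get the same
  --  value, so the resulting grid does not depend on that order)
  (PySem.List.pyRange 0 (st.1.1.length : Int) 1).foldl
    (fun G i =>
      let c := PySem.List.pyGetD st.1.1 i ((0 : Int), (0 : Int))
      if PySem.Set.contains st.1.2 c then G else pvSet2 G c st.2.2)
    grid

-- ===== PORT B =====
def pvNbrs (c : Int × Int) : List (Int × Int) := [(c.1+1, c.2), (c.1-1, c.2), (c.1, c.2+1), (c.1, c.2-1)]

def pvElig (g : List (List Int)) (orig : Int) (c : Int × Int) : Bool :=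
  decide (0 ≤ c.1 ∧ c.1 < (g.length : Int)) && decide (0 ≤ c.2 ∧ c.2 < ((pvRowA g c.1).length : Int)) &&
  (pvAt g c.1 c.2 == orig)

def pvCtrB (g : List (List Int)) (orig : Int) (c : Int × Int) : Bool :=
  (pvNbrs c).all (pvElig g orig)

-- the while loop: Python pops/pushes at the END of the list, the port at the HEAD — the
-- same LIFO discipline, so every pop yields the same cell; `fuel` only makes it structural
def pvBfs (g : List (List Int)) (orig : Int) :
    Nat → List (Int × Int) → List (Int × Int) → List (Int × Int)
  | _, comp, [] => comp
  | 0, comp, _ :: _ => comp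
  | fuel+1, comp, c :: rest =>
    let s := (pvNbrs c).foldl
      (fun (s : List (Int × Int) × List (Int × Int)) n =>
        if pvElig g orig n && !(PySem.Set.contains s.1 n) then (PySem.Set.add s.1 n, n :: s.2) else s)
      (comp, rest)
    pvBfs g orig fuel s.1 s.2

def solution_713_5_1_alt (grid : List (List Int)) (row : Int) (col : Int) (color : Int) : List (List Int) :=
  if decide (0 ≤ row ∧ row < (grid.length : Int)) && decide (0 ≤ col ∧ col < ((pvRowA grid row).length : Int)) then
    let orig := pvAt grid row col
    let comp := pvBfs grid orig (2 * (grid.map List.length).sum + 1) [(row, col)] [(row, col)]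
    -- border = [c for c in comp if not is_center(*c)]; then colour them (order-independent writes)
    (comp.filter (fun c => !(pvCtrB grid orig c))).foldl (fun G c => pvSet2 G c color) grid
  else grid

-- ===== PRECONDITION & SPEC =====
-- Pre_ excludes only ragged grids whose flood fill starts in bounds: there A's unguarded
-- vertical accesses mat[i±1][j] can raise IndexError (on some such grids A still returns —
-- see the cite in the claim; B behaves identically whenever A returns).
def Pre_solution_713_5_1 (grid : List (List Int)) (row : Int) (col : Int) (color : Int) : Prop :=
  (∀ r ∈ grid, r.length = (grid.headD []).length) ∨
  ¬(0 ≤ row ∧ row < (grid.length : Int) ∧ 0 ≤ col ∧ col < ((pvRowA grid row).length : Int))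

instance (grid : List (List Int)) (row : Int) (col : Int) (color : Int) :
    Decidable (Pre_solution_713_5_1 grid row col color) := by unfold Pre_solution_713_5_1; infer_instance

def pvWitness_solution_713_5_1 : List (List Int) × Int × Int × Int := ([[1, 0], [1, 1]], 0, 0, 7)

def Spec_solution_713_5_1 (grid : List (List Int)) (row : Int) (col : Int) (color : Int) (out : List (List Int)) : Prop :=
  out = solution_713_5_1_alt grid row col color
instance (grid : List (List Int)) (row : Int) (col : Int) (color : Int) (out : List (List Int)) :
    Decidable (Spec_solution_713_5_1 grid row col color out) := by unfold Spec_solution_713_5_1; infer_instance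

-- ===== CLAIM (what is proved, stated in full; the proofs are below) =====
def Claim_equal_solution_713_5_1 : Prop := ∀ (grid : List (List Int)) (row : Int) (col : Int) (color : Int), Dom_solution_713_5_1 grid row col color → Pre_solution_713_5_1 grid row col color → Spec_solution_713_5_1 grid row col color (solution_713_5_1 grid row col color)

-- ===== LEMMAS AND PROOFS =====

-- ---------- proof-side notions ----------
def Inb (g : List (List Int)) (c : Int × Int) : Prop :=
  0 ≤ c.1 ∧ c.1 < (g.length : Int) ∧ 0 ≤ c.2 ∧ c.2 < ((pvRowA g c.1).length : Int)

def Ok (g : List (List Int)) (orig : Int) (c : Int × Int) : Prop :=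
  Inb g c ∧ pvAt g c.1 c.2 = orig

inductive Reach (g : List (List Int)) (orig : Int) (s : Int × Int) : Int × Int → Prop
  | base : Reach g orig s s
  | step {c n : Int × Int} : Reach g orig s c → n ∈ pvNbrs c → Ok g orig n → Reach g orig s n

theorem reach_trans {g : List (List Int)} {orig : Int} {a b c : Int × Int}
    (h1 : Reach g orig a b) (h2 : Reach g orig b c) : Reach g orig a c := by
  induction h2 with
  | base => exact h1
  | step _ hnb hok ih => exact Reach.step ih hnb hok

theorem row_len {g : List (List Int)} (hr : ∀ r ∈ g, r.length = (g.headD []).length)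
    {i : Int} (h0 : 0 ≤ i) (h1 : i < (g.length : Int)) :
    (pvRowA g i).length = (g.headD []).length := by
  have hlt : i.toNat < g.length := by omega
  have : pvRowA g i = g[i.toNat] := by
    simp [pvRowA, List.getD_eq_getElem?_getD, List.getElem?_eq_getElem hlt]
  rw [this]
  exact hr _ (List.getElem_mem hlt)

theorem sum_map_len (g : List (List Int)) (W : Nat) (h : ∀ r ∈ g, r.length = W) :
    (g.map List.length).sum = g.length * W := by
  induction g with
  | nil => simp
  | cons r t ih =>
    simp only [List.map_cons, List.sum_cons, List.length_cons]
    rw [h r (by simp), ih (fun x hx => h x (by simp [hx]))]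
    ring

theorem length_le_area (g : List (List Int)) (hr : ∀ r ∈ g, r.length = (g.headD []).length)
    (l : List (Int × Int)) (hn : l.Nodup) (hok : ∀ c ∈ l, Inb g c) :
    l.length ≤ g.length * (g.headD []).length := by
  classical
  set W := (g.headD []).length with hW
  have hinj : ∀ c ∈ l, ∀ d ∈ l, (c.1.toNat, c.2.toNat) = (d.1.toNat, d.2.toNat) → c = d := by
    intro c hc d hd h
    obtain ⟨h1, _, h2, _⟩ := hok c hc
    obtain ⟨h3, _, h4, _⟩ := hok d hd
    have e1 := congrArg Prod.fst h
    have e2 := congrArg Prod.snd h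
    simp only at e1 e2
    have : c.1 = d.1 := by omega
    have : c.2 = d.2 := by omega
    exact Prod.ext ‹c.1 = d.1› ‹c.2 = d.2›
  have hnd : (l.map (fun c : Int × Int => (c.1.toNat, c.2.toNat))).Nodup := hn.map_on hinj
  have hsub : (l.map (fun c : Int × Int => (c.1.toNat, c.2.toNat))).toFinset ⊆
      Finset.range g.length ×ˢ Finset.range W := by
    intro p hp
    simp only [List.mem_toFinset, List.mem_map] at hp
    obtain ⟨c, hc, rfl⟩ := hp
    obtain ⟨h1, h2, h3, h4⟩ := hok c hc
    have hWc : (pvRowA g c.1).length = W := row_len hr h1 h2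
    simp only [Finset.mem_product, Finset.mem_range]
    omega
  calc l.length = (l.map (fun c : Int × Int => (c.1.toNat, c.2.toNat))).length := by simp
    _ = (l.map (fun c : Int × Int => (c.1.toNat, c.2.toNat))).toFinset.card :=
        (List.toFinset_card_of_nodup hnd).symm
    _ ≤ (Finset.range g.length ×ˢ Finset.range W).card := Finset.card_le_card hsub
    _ = g.length * W := by simp

theorem ctr_eq (g : List (List Int)) (orig : Int)
    (hr : ∀ r ∈ g, r.length = (g.headD []).length) (c : Int × Int) (hc : Inb g c) :
    pvCtrA g orig c.1 c.2 = pvCtrB g orig c := by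
  obtain ⟨h1, h2, h3, h4⟩ := hc
  have hW := row_len hr h1 h2
  rw [Bool.eq_iff_iff]
  simp only [pvCtrA, pvCtrB, pvNbrs, pvElig, List.all_cons, List.all_nil, Bool.and_true,
    Bool.and_eq_true, decide_eq_true_eq, beq_iff_eq]
  constructor
  · rintro ⟨⟨⟨⟨b1, b2⟩, b3⟩, b4⟩, ⟨⟨⟨v1, v2⟩, v3⟩, v4⟩⟩
    have e1 := row_len hr (by omega : (0:Int) ≤ c.1 + 1) b1.2
    have e2 := row_len hr (by omega : (0:Int) ≤ c.1 - 1) b2.2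
    exact ⟨⟨⟨b1, by omega⟩, v1⟩, ⟨⟨b2, by omega⟩, v2⟩, ⟨⟨⟨h1, h2⟩, b3⟩, v3⟩, ⟨⟨⟨h1, h2⟩, b4⟩, v4⟩⟩
  · rintro ⟨⟨⟨hb1, _⟩, v1⟩, ⟨⟨hb2, _⟩, v2⟩, ⟨⟨_, hb3⟩, v3⟩, ⟨⟨_, hb4⟩, v4⟩⟩
    exact ⟨⟨⟨⟨hb1, hb2⟩, hb3⟩, hb4⟩, ⟨⟨v1, v2⟩, v3⟩, v4⟩

-- writes of the same value to (possibly equal) cells commute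
theorem pvSet2_comm (G : List (List Int)) (a b : Int × Int) (v : Int) :
    pvSet2 (pvSet2 G a v) b v = pvSet2 (pvSet2 G b v) a v := by
  unfold pvSet2
  generalize a.1.toNat = ra; generalize a.2.toNat = qa
  generalize hrb : b.1.toNat = rb; generalize b.2.toNat = qb
  by_cases hab : ra = rb
  · subst hab
    by_cases hlen : ra < G.length
    · have h1 : ∀ x : List Int, (G.set ra x).getD ra [] = x := by
        intro x
        rw [List.getD_eq_getElem?_getD]
        simp [hlen]
      rw [h1, h1, List.set_set, List.set_set]
      by_cases hq : qa = qb
      · subst hq; rw [List.set_set]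
      · rw [List.set_comm _ _ hq]
    · have hle : G.length ≤ ra := by omega
      have e : ∀ x : List Int, G.set ra x = G := fun x => List.set_eq_of_length_le hle
      simp [e]
  · have h1 : ∀ x : List Int, (G.set ra x).getD rb [] = G.getD rb [] := by
      intro x; rw [List.getD_eq_getElem?_getD, List.getElem?_set_ne hab, ← List.getD_eq_getElem?_getD]
    have h2 : ∀ x : List Int, (G.set rb x).getD ra [] = G.getD ra [] := by
      intro x; rw [List.getD_eq_getElem?_getD, List.getElem?_set_ne (Ne.symm hab), ← List.getD_eq_getElem?_getD]
    rw [h1, h2, List.set_comm _ _ hab]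



-- ---------- small PySem.Set facts ----------
theorem length_add (s : List (Int × Int)) (x : Int × Int) :
    (PySem.Set.add s x).length = if x ∈ s then s.length else s.length + 1 := by
  rw [PySem.Set.add_eq_ite]; split <;> simp

theorem length_le_add (s : List (Int × Int)) (x : Int × Int) :
    s.length ≤ (PySem.Set.add s x).length := by
  rw [length_add]; split <;> omega

-- ---------- A-side: what the recursive DFS computes ----------
structure DfsPost (g : List (List Int)) (orig : Int) (cur : Int × Int)
    (been center : List (Int × Int)) (r : List (Int × Int) × List (Int × Int)) : Prop where
  mono : ∀ c ∈ been, c ∈ r.1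
  hcur : cur ∈ r.1
  nodup : r.1.Nodup
  okAll : ∀ c ∈ r.1, Ok g orig c
  len : been.length ≤ r.1.length
  reach : ∀ c ∈ r.1, c ∈ been ∨ Reach g orig cur c
  closure : ∀ c ∈ r.1, c ∉ PySem.Set.add been cur → ∀ m ∈ pvNbrs c, Ok g orig m → m ∈ r.1
  closureCur : ∀ m ∈ pvNbrs cur, Ok g orig m → m ∈ r.1
  ctr : ∀ p, p ∈ r.2 ↔ p ∈ center ∨
      ((p = cur ∨ (p ∈ r.1 ∧ p ∉ PySem.Set.add been cur)) ∧ pvCtrA g orig p.1 p.2 = true)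

structure AInv (g : List (List Int)) (orig : Int) (cur : Int × Int)
    (been0 center1 : List (Int × Int)) (s : List (Int × Int) × List (Int × Int)) : Prop where
  mono : ∀ c ∈ been0, c ∈ s.1
  nodup : s.1.Nodup
  okAll : ∀ c ∈ s.1, Ok g orig c
  len : been0.length ≤ s.1.length
  reach : ∀ c ∈ s.1, c ∈ been0 ∨ Reach g orig cur c
  closure : ∀ c ∈ s.1, c ∉ been0 → ∀ m ∈ pvNbrs c, Ok g orig m → m ∈ s.1
  ctr : ∀ p, p ∈ s.2 ↔ p ∈ center1 ∨ ((p ∈ s.1 ∧ p ∉ been0) ∧ pvCtrA g orig p.1 p.2 = true)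

-- one neighbour block of solution_713_5_2 (proof-side name for the `step` helper in pvDfsA)
def pvStepT (g : List (List Int)) (orig : Int) (fuel : Nat) (n : Int × Int) (b : Bool)
    (s : List (Int × Int) × List (Int × Int)) : List (Int × Int) × List (Int × Int) :=
  if b && (pvAt g n.1 n.2 == orig) && !(PySem.Set.contains s.1 n) then
    pvDfsA g orig fuel n.1 n.2 (PySem.Set.add s.1 n) s.2
  else s

theorem pvDfsA_succ (g : List (List Int)) (orig : Int) (fuel : Nat) (i j : Int)
    (been center : List (Int × Int)) :
    pvDfsA g orig (fuel+1) i j been center =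
      pvStepT g orig fuel (i, j-1) (decide (0 ≤ j-1 ∧ j-1 < ((pvRowA g i).length : Int)))
        (pvStepT g orig fuel (i, j+1) (decide (0 ≤ j+1 ∧ j+1 < ((pvRowA g i).length : Int)))
          (pvStepT g orig fuel (i-1, j) (decide (0 ≤ i-1 ∧ i-1 < (g.length : Int)))
            (pvStepT g orig fuel (i+1, j) (decide (0 ≤ i+1 ∧ i+1 < (g.length : Int)))
              ((if PySem.Set.contains been (i, j) then been else PySem.Set.add been (i, j)),
               (if pvCtrA g orig i j then PySem.Set.add center (i, j) else center))))) := rfl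

theorem stepA_block (g : List (List Int)) (orig : Int) (fuel : Nat)
    (IH : ∀ (i j : Int) (been center : List (Int × Int)),
        Ok g orig (i, j) → been.Nodup → (∀ c ∈ been, Ok g orig c) →
        g.length * (g.headD []).length + 1 ≤ fuel + been.length →
        DfsPost g orig (i, j) been center (pvDfsA g orig fuel i j been center))
    (cur n : Int × Int) (hnb : n ∈ pvNbrs cur) (b : Bool)
    (hbOk : (b && (pvAt g n.1 n.2 == orig)) = true → Ok g orig n)
    (hOkb : Ok g orig n → b = true)
    (been0 center1 : List (Int × Int))
    (hfuel : g.length * (g.headD []).length ≤ fuel + been0.length)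
    (s : List (Int × Int) × List (Int × Int))
    (inv : AInv g orig cur been0 center1 s) :
    AInv g orig cur been0 center1 (pvStepT g orig fuel n b s) ∧
      (∀ x ∈ s.1, x ∈ (pvStepT g orig fuel n b s).1) ∧
      (Ok g orig n → n ∈ (pvStepT g orig fuel n b s).1) := by
  unfold pvStepT
  by_cases hcond : (b && (pvAt g n.1 n.2 == orig) && !(PySem.Set.contains s.1 n)) = true
  · rw [if_pos hcond]
    simp only [Bool.and_eq_true, Bool.not_eq_true', PySem.Set.contains_eq_listContains] at hcond
    obtain ⟨⟨hb, hval⟩, hfresh⟩ := hcond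
    have hfresh' : n ∉ s.1 := by
      intro h; simp [List.contains_eq_mem, h] at hfresh
    have hOkn : Ok g orig n := hbOk (by rw [hb, hval]; rfl)
    have hlen_add : (PySem.Set.add s.1 n).length = s.1.length + 1 := by
      rw [length_add, if_neg hfresh']
    have post := IH n.1 n.2 (PySem.Set.add s.1 n) s.2
      (by rw [Prod.mk.eta]; exact hOkn)
      (PySem.Set.nodup_add _ _ inv.nodup)
      (by intro c hc
          rcases (PySem.Set.mem_add _ _ _).mp hc with h | h
          · exact inv.okAll c h
          · subst h; exact hOkn)
      (by have hl := inv.len; rw [hlen_add]; omega)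
    rw [Prod.mk.eta] at post
    have hsub : ∀ x ∈ s.1, x ∈ (pvDfsA g orig fuel n.1 n.2 (PySem.Set.add s.1 n) s.2).1 := by
      intro x hx; exact post.mono x ((PySem.Set.mem_add _ _ _).mpr (Or.inl hx))
    have hreach_cur_n : Reach g orig cur n := Reach.step Reach.base hnb hOkn
    have hbase_idem : PySem.Set.add (PySem.Set.add s.1 n) n = PySem.Set.add s.1 n :=
      PySem.Set.add_of_mem ((PySem.Set.mem_add _ _ _).mpr (Or.inr rfl))
    refine ⟨⟨?_, post.nodup, post.okAll, ?_, ?_, ?_, ?_⟩, hsub, fun _ => post.hcur⟩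
    · intro c hc; exact hsub c (inv.mono c hc)
    · calc been0.length ≤ s.1.length := inv.len
        _ ≤ (PySem.Set.add s.1 n).length := length_le_add _ _
        _ ≤ _ := post.len
    · intro c hc
      rcases post.reach c hc with h | h
      · rcases (PySem.Set.mem_add _ _ _).mp h with h' | h'
        · exact inv.reach c h'
        · subst h'; exact Or.inr hreach_cur_n
      · exact Or.inr (reach_trans hreach_cur_n h)
    · intro c hc hnot m hm hOkm
      by_cases hcs : c ∈ s.1
      · exact hsub m (inv.closure c hcs hnot m hm hOkm)
      · by_cases hcn : c = n
        · subst hcn; exact post.closureCur m hm hOkm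
        · have : c ∉ PySem.Set.add (PySem.Set.add s.1 n) n := by
            rw [hbase_idem]; intro h
            rcases (PySem.Set.mem_add _ _ _).mp h with h' | h' <;> [exact hcs h'; exact hcn h']
          exact post.closure c hc this m hm hOkm
    · intro p
      rw [post.ctr p, inv.ctr p, hbase_idem]
      constructor
      · rintro (h | ⟨(rfl | ⟨h1, h2⟩), hc⟩)
        · rcases h with h | ⟨⟨h1, h2⟩, hc⟩
          · exact Or.inl h
          · exact Or.inr ⟨⟨hsub p h1, h2⟩, hc⟩
        · refine Or.inr ⟨⟨post.hcur, fun h => hfresh' (inv.mono p h)⟩, hc⟩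
        · refine Or.inr ⟨⟨h1, fun h => h2 ((PySem.Set.mem_add _ _ _).mpr (Or.inl (inv.mono p h)))⟩, hc⟩
      · rintro (h | ⟨⟨h1, h2⟩, hc⟩)
        · exact Or.inl (Or.inl h)
        · by_cases hps : p ∈ s.1
          · exact Or.inl (Or.inr ⟨⟨hps, h2⟩, hc⟩)
          · by_cases hpn : p = n
            · exact Or.inr ⟨Or.inl hpn, hc⟩
            · refine Or.inr ⟨Or.inr ⟨h1, ?_⟩, hc⟩
              intro h; rcases (PySem.Set.mem_add _ _ _).mp h with h' | h' <;> [exact hps h'; exact hpn h']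
  · rw [if_neg hcond]
    refine ⟨inv, fun x hx => hx, ?_⟩
    intro hOkn
    have hb : b = true := hOkb hOkn
    have hval : (pvAt g n.1 n.2 == orig) = true := by
      rw [beq_iff_eq]; exact hOkn.2
    by_contra hns
    have : PySem.Set.contains s.1 n = false := by
      simp only [PySem.Set.contains_eq_listContains]
      rw [List.contains_eq_mem]; simpa using hns
    rw [hb, hval, this] at hcond
    exact hcond rfl


theorem dfsA_spec (g : List (List Int)) (orig : Int)
    (hr : ∀ r ∈ g, r.length = (g.headD []).length) :
    ∀ (fuel : Nat) (i j : Int) (been center : List (Int × Int)),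
      Ok g orig (i, j) → been.Nodup → (∀ c ∈ been, Ok g orig c) →
      g.length * (g.headD []).length + 1 ≤ fuel + been.length →
      DfsPost g orig (i, j) been center (pvDfsA g orig fuel i j been center) := by
  intro fuel
  induction fuel with
  | zero =>
    intro i j been center hok hnd hball hfuel
    exfalso
    have := length_le_area g hr been hnd (fun c hc => (hball c hc).1)
    omega
  | succ fuel IH =>
    intro i j been center hok hnd hball hfuel
    obtain ⟨⟨hi0, hiR, hj0, hjW⟩, hval⟩ := hok
    simp only at hi0 hiR hj0 hjW hval
    have hWi : (pvRowA g i).length = (g.headD []).length := row_len hr hi0 hiR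
    rw [pvDfsA_succ]
    set been0 := (if PySem.Set.contains been (i, j) then been else PySem.Set.add been (i, j)) with hbeen0
    set center1 := (if pvCtrA g orig i j then PySem.Set.add center (i, j) else center) with hcenter1
    have hb0 : been0 = PySem.Set.add been (i, j) := by
      rw [hbeen0]
      by_cases h : (i, j) ∈ been
      · rw [if_pos (by simp [PySem.Set.contains_eq_listContains, List.contains_eq_mem, h]),
          PySem.Set.add_of_mem h]
      · rw [if_neg (by simp [PySem.Set.contains_eq_listContains, List.contains_eq_mem, h])]
    have hcur_mem : (i, j) ∈ been0 := by
      rw [hb0]; exact (PySem.Set.mem_add _ _ _).mpr (Or.inr rfl)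
    have hnd0 : been0.Nodup := by rw [hb0]; exact PySem.Set.nodup_add _ _ hnd
    have hok0 : ∀ c ∈ been0, Ok g orig c := by
      intro c hc; rw [hb0] at hc
      rcases (PySem.Set.mem_add _ _ _).mp hc with h | h
      · exact hball c h
      · subst h; exact ⟨⟨hi0, hiR, hj0, hjW⟩, hval⟩
    have hlen0 : been.length ≤ been0.length := by rw [hb0]; exact length_le_add _ _
    have hfuel0 : g.length * (g.headD []).length ≤ fuel + been0.length := by omega
    have inv0 : AInv g orig (i, j) been0 center1 (been0, center1) := by
      refine ⟨fun c hc => hc, hnd0, hok0, le_refl _, fun c hc => Or.inl hc,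
        fun c hc hnc => absurd hc hnc, fun p => ?_⟩
      constructor
      · exact fun h => Or.inl h
      · rintro (h | ⟨⟨h1, h2⟩, _⟩)
        · exact h
        · exact absurd h1 h2
    -- the four neighbour blocks, in A's order
    have hbOk1 : ((decide (0 ≤ i+1 ∧ i+1 < (g.length : Int))) && (pvAt g (i+1, j).1 (i+1, j).2 == orig)) = true →
        Ok g orig (i+1, j) := by
      simp only [Bool.and_eq_true, decide_eq_true_eq, beq_iff_eq]
      rintro ⟨⟨hb1, hb2⟩, hv⟩
      have := row_len hr hb1 hb2
      exact ⟨⟨hb1, hb2, hj0, by simp only; omega⟩, hv⟩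
    have hOkb1 : Ok g orig (i+1, j) → (decide (0 ≤ i+1 ∧ i+1 < (g.length : Int))) = true := by
      rintro ⟨⟨h1, h2, _, _⟩, _⟩; simp only at h1 h2
      simp only [decide_eq_true_eq]; exact ⟨h1, h2⟩
    have hbOk2 : ((decide (0 ≤ i-1 ∧ i-1 < (g.length : Int))) && (pvAt g (i-1, j).1 (i-1, j).2 == orig)) = true →
        Ok g orig (i-1, j) := by
      simp only [Bool.and_eq_true, decide_eq_true_eq, beq_iff_eq]
      rintro ⟨⟨hb1, hb2⟩, hv⟩
      have := row_len hr hb1 hb2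
      exact ⟨⟨hb1, hb2, hj0, by simp only; omega⟩, hv⟩
    have hOkb2 : Ok g orig (i-1, j) → (decide (0 ≤ i-1 ∧ i-1 < (g.length : Int))) = true := by
      rintro ⟨⟨h1, h2, _, _⟩, _⟩; simp only at h1 h2
      simp only [decide_eq_true_eq]; exact ⟨h1, h2⟩
    have hbOk3 : ((decide (0 ≤ j+1 ∧ j+1 < ((pvRowA g i).length : Int))) && (pvAt g (i, j+1).1 (i, j+1).2 == orig)) = true →
        Ok g orig (i, j+1) := by
      simp only [Bool.and_eq_true, decide_eq_true_eq, beq_iff_eq]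
      rintro ⟨⟨hb1, hb2⟩, hv⟩
      exact ⟨⟨hi0, hiR, hb1, hb2⟩, hv⟩
    have hOkb3 : Ok g orig (i, j+1) → (decide (0 ≤ j+1 ∧ j+1 < ((pvRowA g i).length : Int))) = true := by
      rintro ⟨⟨_, _, h3, h4⟩, _⟩; simp only at h3 h4
      simp only [decide_eq_true_eq]; exact ⟨h3, h4⟩
    have hbOk4 : ((decide (0 ≤ j-1 ∧ j-1 < ((pvRowA g i).length : Int))) && (pvAt g (i, j-1).1 (i, j-1).2 == orig)) = true →
        Ok g orig (i, j-1) := by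
      simp only [Bool.and_eq_true, decide_eq_true_eq, beq_iff_eq]
      rintro ⟨⟨hb1, hb2⟩, hv⟩
      exact ⟨⟨hi0, hiR, hb1, hb2⟩, hv⟩
    have hOkb4 : Ok g orig (i, j-1) → (decide (0 ≤ j-1 ∧ j-1 < ((pvRowA g i).length : Int))) = true := by
      rintro ⟨⟨_, _, h3, h4⟩, _⟩; simp only at h3 h4
      simp only [decide_eq_true_eq]; exact ⟨h3, h4⟩
    obtain ⟨inv1, sub1, okn1⟩ := stepA_block g orig fuel IH (i, j) (i+1, j) (by simp [pvNbrs]) _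
      hbOk1 hOkb1 been0 center1 hfuel0 (been0, center1) inv0
    obtain ⟨inv2, sub2, okn2⟩ := stepA_block g orig fuel IH (i, j) (i-1, j) (by simp [pvNbrs]) _
      hbOk2 hOkb2 been0 center1 hfuel0 _ inv1
    obtain ⟨inv3, sub3, okn3⟩ := stepA_block g orig fuel IH (i, j) (i, j+1) (by simp [pvNbrs]) _
      hbOk3 hOkb3 been0 center1 hfuel0 _ inv2
    obtain ⟨inv4, sub4, okn4⟩ := stepA_block g orig fuel IH (i, j) (i, j-1) (by simp [pvNbrs]) _
      hbOk4 hOkb4 been0 center1 hfuel0 _ inv3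
    refine ⟨?_, inv4.mono _ hcur_mem, inv4.nodup, inv4.okAll, hlen0.trans inv4.len, ?_, ?_, ?_, ?_⟩
    · intro c hc
      exact inv4.mono c (by rw [hb0]; exact (PySem.Set.mem_add _ _ _).mpr (Or.inl hc))
    · intro c hc
      rcases inv4.reach c hc with h | h
      · rw [hb0] at h
        rcases (PySem.Set.mem_add _ _ _).mp h with h' | h'
        · exact Or.inl h'
        · subst h'; exact Or.inr Reach.base
      · exact Or.inr h
    · intro c hc hnc
      rw [← hb0] at hnc
      exact inv4.closure c hc hnc
    · intro m hm hOkm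
      simp only [pvNbrs, List.mem_cons, List.not_mem_nil, or_false] at hm
      rcases hm with rfl | rfl | rfl | rfl
      · exact sub4 _ (sub3 _ (sub2 _ (okn1 hOkm)))
      · exact sub4 _ (sub3 _ (okn2 hOkm))
      · exact sub4 _ (okn3 hOkm)
      · exact okn4 hOkm
    · intro p
      rw [inv4.ctr p]
      have hc1 : p ∈ center1 ↔ p ∈ center ∨ (p = (i, j) ∧ pvCtrA g orig p.1 p.2 = true) := by
        by_cases hC : pvCtrA g orig i j = true
        · rw [hcenter1, if_pos hC]
          constructor
          · intro h
            rcases (PySem.Set.mem_add _ _ _).mp h with h' | h'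
            · exact Or.inl h'
            · exact Or.inr ⟨h', by rw [h']; exact hC⟩
          · rintro (h | ⟨rfl, _⟩)
            · exact (PySem.Set.mem_add _ _ _).mpr (Or.inl h)
            · exact (PySem.Set.mem_add _ _ _).mpr (Or.inr rfl)
        · rw [hcenter1, if_neg hC]
          constructor
          · exact fun h => Or.inl h
          · rintro (h | ⟨rfl, hc⟩)
            · exact h
            · exact absurd hc hC
      rw [hc1, ← hb0]
      constructor
      · rintro ((h | ⟨rfl, hc⟩) | ⟨⟨h1, h2⟩, hc⟩)
        · exact Or.inl h
        · exact Or.inr ⟨Or.inl rfl, hc⟩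
        · exact Or.inr ⟨Or.inr ⟨h1, h2⟩, hc⟩
      · rintro (h | ⟨(rfl | ⟨h1, h2⟩), hc⟩)
        · exact Or.inl (Or.inl h)
        · exact Or.inl (Or.inr ⟨rfl, hc⟩)
        · exact Or.inr ⟨⟨h1, h2⟩, hc⟩


-- ---------- B-side: what the worklist flood fill computes ----------
theorem elig_iff (g : List (List Int)) (orig : Int) (c : Int × Int) :
    pvElig g orig c = true ↔ Ok g orig c := by
  simp only [pvElig, Bool.and_eq_true, decide_eq_true_eq, beq_iff_eq, Ok, Inb]
  tauto

structure BInv (g : List (List Int)) (orig : Int) (s0 : Int × Int)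
    (comp rest : List (Int × Int)) (t : List (Int × Int) × List (Int × Int)) : Prop where
  mono : ∀ x ∈ comp, x ∈ t.1
  nodup : t.1.Nodup
  okAll : ∀ x ∈ t.1, Ok g orig x
  reach : ∀ x ∈ t.1, Reach g orig s0 x
  restSub : ∀ x ∈ rest, x ∈ t.2
  stackSub : ∀ x ∈ t.2, x ∈ t.1
  newInStack : ∀ x ∈ t.1, x ∈ comp ∨ x ∈ t.2
  len : t.2.length + 2 * comp.length ≤ rest.length + 2 * t.1.length

-- the body of B's inner for-loop (proof-side name)
def pvBStepT (g : List (List Int)) (orig : Int)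
    (s : List (Int × Int) × List (Int × Int)) (n : Int × Int) :
    List (Int × Int) × List (Int × Int) :=
  if pvElig g orig n && !(PySem.Set.contains s.1 n) then (PySem.Set.add s.1 n, n :: s.2) else s

theorem pvBfs_succ (g : List (List Int)) (orig : Int) (fuel : Nat) (c : Int × Int)
    (rest comp : List (Int × Int)) :
    pvBfs g orig (fuel+1) comp (c :: rest) =
      pvBfs g orig fuel ((pvNbrs c).foldl (pvBStepT g orig) (comp, rest)).1
        ((pvNbrs c).foldl (pvBStepT g orig) (comp, rest)).2 := rfl

theorem stepB_block (g : List (List Int)) (orig : Int) (s0 : Int × Int)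
    (comp rest : List (Int × Int)) (n : Int × Int)
    (hRn : Ok g orig n → Reach g orig s0 n)
    (t : List (Int × Int) × List (Int × Int)) (inv : BInv g orig s0 comp rest t) :
    BInv g orig s0 comp rest (pvBStepT g orig t n) ∧
      (∀ x ∈ t.1, x ∈ (pvBStepT g orig t n).1) ∧
      (Ok g orig n → n ∈ (pvBStepT g orig t n).1) := by
  unfold pvBStepT
  by_cases hcond : (pvElig g orig n && !(PySem.Set.contains t.1 n)) = true
  · rw [if_pos hcond]
    simp only [Bool.and_eq_true, Bool.not_eq_true', PySem.Set.contains_eq_listContains] at hcond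
    obtain ⟨helig, hfresh⟩ := hcond
    have hOkn : Ok g orig n := (elig_iff g orig n).mp helig
    have hfresh' : n ∉ t.1 := by
      intro h; simp [List.contains_eq_mem, h] at hfresh
    have hmem : ∀ x, x ∈ PySem.Set.add t.1 n ↔ x ∈ t.1 ∨ x = n :=
      fun x => PySem.Set.mem_add _ _ _
    refine ⟨⟨?_, PySem.Set.nodup_add _ _ inv.nodup, ?_, ?_, ?_, ?_, ?_, ?_⟩, ?_, ?_⟩
    · exact fun x hx => (hmem x).mpr (Or.inl (inv.mono x hx))
    · intro x hx
      rcases (hmem x).mp hx with h | h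
      · exact inv.okAll x h
      · subst h; exact hOkn
    · intro x hx
      rcases (hmem x).mp hx with h | h
      · exact inv.reach x h
      · subst h; exact hRn hOkn
    · exact fun x hx => List.mem_cons_of_mem _ (inv.restSub x hx)
    · intro x hx
      rcases List.mem_cons.mp hx with h | h
      · subst h; exact (hmem x).mpr (Or.inr rfl)
      · exact (hmem x).mpr (Or.inl (inv.stackSub x h))
    · intro x hx
      rcases (hmem x).mp hx with h | h
      · rcases inv.newInStack x h with h' | h'
        · exact Or.inl h'
        · exact Or.inr (List.mem_cons_of_mem _ h')
      · exact Or.inr (by rw [h]; exact List.mem_cons_self)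
    · have h1 : (PySem.Set.add t.1 n).length = t.1.length + 1 := by
        rw [length_add, if_neg hfresh']
      have h2 := inv.len
      simp only [List.length_cons, h1]
      omega
    · exact fun x hx => (hmem x).mpr (Or.inl hx)
    · exact fun _ => (hmem n).mpr (Or.inr rfl)
  · rw [if_neg hcond]
    refine ⟨inv, fun x hx => hx, ?_⟩
    intro hOkn
    have helig := (elig_iff g orig n).mpr hOkn
    by_contra hns
    have : PySem.Set.contains t.1 n = false := by
      simp only [PySem.Set.contains_eq_listContains]
      rw [List.contains_eq_mem]; simpa using hns
    rw [helig, this] at hcond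
    exact hcond rfl

structure BfsPost (g : List (List Int)) (orig : Int) (s0 : Int × Int)
    (comp r : List (Int × Int)) : Prop where
  mono : ∀ c ∈ comp, c ∈ r
  nodup : r.Nodup
  okAll : ∀ c ∈ r, Ok g orig c
  reach : ∀ c ∈ r, Reach g orig s0 c
  closure : ∀ c ∈ r, ∀ m ∈ pvNbrs c, Ok g orig m → m ∈ r

theorem bfs_spec (g : List (List Int)) (orig : Int)
    (hr : ∀ r ∈ g, r.length = (g.headD []).length) (s0 : Int × Int) :
    ∀ (fuel : Nat) (comp stack : List (Int × Int)),
      comp.Nodup → (∀ c ∈ comp, Ok g orig c) → (∀ c ∈ stack, c ∈ comp) →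
      (∀ c ∈ comp, c ∉ stack → ∀ m ∈ pvNbrs c, Ok g orig m → m ∈ comp) →
      (∀ c ∈ comp, Reach g orig s0 c) →
      stack.length + 2 * (g.length * (g.headD []).length) ≤ fuel + 2 * comp.length →
      BfsPost g orig s0 comp (pvBfs g orig fuel comp stack) := by
  intro fuel
  induction fuel with
  | zero =>
    intro comp stack hnd hok hsub hclo hreach hfuel
    match stack, hsub, hfuel with
    | [], hsub, hfuel =>
      exact ⟨fun c hc => hc, hnd, hok, hreach, fun c hc => hclo c hc (by simp)⟩
    | c :: rest, hsub, hfuel =>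
      exfalso
      have := length_le_area g hr comp hnd (fun c hc => (hok c hc).1)
      simp only [List.length_cons] at hfuel
      omega
  | succ fuel IH =>
    intro comp stack hnd hok hsub hclo hreach hfuel
    match stack, hsub, hclo, hfuel with
    | [], hsub, hclo, hfuel =>
      exact ⟨fun c hc => hc, hnd, hok, hreach, fun c hc => hclo c hc (by simp)⟩
    | c :: rest, hsub, hclo, hfuel =>
      rw [pvBfs_succ]
      have hc_mem : c ∈ comp := hsub c List.mem_cons_self
      have hRc : Reach g orig s0 c := hreach c hc_mem
      have inv0 : BInv g orig s0 comp rest (comp, rest) :=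
        ⟨fun x hx => hx, hnd, hok, hreach, fun x hx => hx,
         fun x hx => hsub x (List.mem_cons_of_mem _ hx), fun x hx => Or.inl hx, le_refl _⟩
      have hRn : ∀ m ∈ pvNbrs c, Ok g orig m → Reach g orig s0 m :=
        fun m hm hOkm => Reach.step hRc hm hOkm
      simp only [pvNbrs, List.foldl_cons, List.foldl_nil]
      obtain ⟨inv1, sub1, okn1⟩ := stepB_block g orig s0 comp rest (c.1+1, c.2)
        (hRn _ (by simp [pvNbrs])) _ inv0
      obtain ⟨inv2, sub2, okn2⟩ := stepB_block g orig s0 comp rest (c.1-1, c.2)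
        (hRn _ (by simp [pvNbrs])) _ inv1
      obtain ⟨inv3, sub3, okn3⟩ := stepB_block g orig s0 comp rest (c.1, c.2+1)
        (hRn _ (by simp [pvNbrs])) _ inv2
      obtain ⟨inv4, sub4, okn4⟩ := stepB_block g orig s0 comp rest (c.1, c.2-1)
        (hRn _ (by simp [pvNbrs])) _ inv3
      set t4 := pvBStepT g orig (pvBStepT g orig (pvBStepT g orig (pvBStepT g orig (comp, rest) (c.1+1, c.2)) (c.1-1, c.2)) (c.1, c.2+1)) (c.1, c.2-1) with ht4
      have post := IH t4.1 t4.2 inv4.nodup inv4.okAll inv4.stackSub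
        ?_ inv4.reach ?_
      · exact ⟨fun x hx => post.mono x (inv4.mono x hx), post.nodup, post.okAll, post.reach, post.closure⟩
      · -- closure precondition for the recursive call
        intro x hx hxnot m hm hOkm
        by_cases hxc : x ∈ comp
        · by_cases hxs : x ∈ (c :: rest)
          · rcases List.mem_cons.mp hxs with h | h
            · subst h
              simp only [pvNbrs, List.mem_cons, List.not_mem_nil, or_false] at hm
              rcases hm with rfl | rfl | rfl | rfl
              · exact sub4 _ (sub3 _ (sub2 _ (okn1 hOkm)))
              · exact sub4 _ (sub3 _ (okn2 hOkm))
              · exact sub4 _ (okn3 hOkm)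
              · exact okn4 hOkm
            · exact absurd (inv4.restSub x h) hxnot
          · have hnotrest : x ∉ rest := fun h => hxs (List.mem_cons_of_mem _ h)
            exact inv4.mono m (hclo x hxc hxs m hm hOkm)
        · rcases inv4.newInStack x hx with h | h
          · exact absurd h hxc
          · exact absurd h hxnot
      · -- fuel bound for the recursive call
        have h1 := inv4.len
        simp only [List.length_cons] at hfuel
        omega


-- ---------- A's locate loop fires exactly once ----------
theorem foldl_id_of {α : Type} (l : List Int) (body : α → Int → α) (st : α)
    (h : ∀ x ∈ l, ∀ s, body s x = s) : l.foldl body st = st := by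
  induction l generalizing st with
  | nil => rfl
  | cons a tl ih =>
    rw [List.foldl_cons, h a List.mem_cons_self]
    exact ih st (fun x hx s => h x (List.mem_cons_of_mem _ hx) s)

theorem foldl_once {α : Type} (a b x0 : Int) (ha : a ≤ x0) (hb : x0 < b)
    (body : α → Int → α) (st : α)
    (hid : ∀ x, a ≤ x → x < b → x ≠ x0 → ∀ s, body s x = s) :
    (PySem.List.pyRange a b 1).foldl body st = body st x0 := by
  have hpre : List.foldl body st (PySem.List.pyRange a x0 1) = st :=
    foldl_id_of _ _ _ (fun x hx s => by
      obtain ⟨hx1, hx2⟩ := PySem.List.mem_pyRange_one.mp hx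
      exact hid x hx1 (by omega) (by omega) s)
  rw [PySem.List.pyRange_one_append a x0 b ha (le_of_lt hb), List.foldl_append, hpre,
    PySem.List.pyRange_one_cons hb, List.foldl_cons]
  exact foldl_id_of _ _ _ (fun x hx s => by
    obtain ⟨hx1, hx2⟩ := PySem.List.mem_pyRange_one.mp hx
    exact hid x (by omega) hx2 (by omega) s)

-- proof-side name for the locate loop of port A
def pvLocate (grid : List (List Int)) (row col color : Int) :
    (List (Int × Int) × List (Int × Int)) × Int × Int :=
  (PySem.List.pyRange 0 (grid.length : Int) 1).foldl
    (fun (st : (List (Int × Int) × List (Int × Int)) × Int × Int) i =>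
      (PySem.List.pyRange 0 ((pvRowA grid i).length : Int) 1).foldl
        (fun st j =>
          if i == row && j == col then
            (pvDfsA grid (pvAt grid i j) ((grid.map List.length).sum + 1) i j st.1.1 st.1.2,
             pvAt grid i j, color)
          else st) st)
    (([], []), (-1 : Int), (-1 : Int))

theorem solution_713_5_1_eq (grid : List (List Int)) (row col color : Int) :
    solution_713_5_1 grid row col color =
      (PySem.List.pyRange 0 ((pvLocate grid row col color).1.1.length : Int) 1).foldl
        (fun G i =>
          if PySem.Set.contains (pvLocate grid row col color).1.2
              (PySem.List.pyGetD (pvLocate grid row col color).1.1 i ((0 : Int), (0 : Int))) then G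
          else pvSet2 G (PySem.List.pyGetD (pvLocate grid row col color).1.1 i ((0 : Int), (0 : Int)))
            (pvLocate grid row col color).2.2)
        grid := rfl

theorem pvLocate_out (grid : List (List Int)) (row col color : Int)
    (hout : ¬((0 ≤ row ∧ row < (grid.length : Int)) ∧ (0 ≤ col ∧ col < ((pvRowA grid row).length : Int)))) :
    pvLocate grid row col color = (([], []), (-1 : Int), (-1 : Int)) := by
  unfold pvLocate
  apply foldl_id_of
  intro i hi st
  have hi' := PySem.List.mem_pyRange_one.mp hi
  apply foldl_id_of
  intro j hj s
  have hj' := PySem.List.mem_pyRange_one.mp hj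
  have hcond : (i == row && j == col) = false := by
    by_cases h1 : i = row
    · subst h1
      by_cases h2 : j = col
      · subst h2; exact absurd ⟨⟨hi'.1, hi'.2⟩, ⟨hj'.1, hj'.2⟩⟩ hout
      · simp [h2]
    · simp [h1]
  rw [hcond]
  simp

theorem pvLocate_in (grid : List (List Int)) (row col color : Int)
    (hin : (0 ≤ row ∧ row < (grid.length : Int)) ∧ (0 ≤ col ∧ col < ((pvRowA grid row).length : Int))) :
    pvLocate grid row col color =
      (pvDfsA grid (pvAt grid row col) ((grid.map List.length).sum + 1) row col [] [],
       pvAt grid row col, color) := by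
  unfold pvLocate
  rw [foldl_once 0 (grid.length : Int) row hin.1.1 hin.1.2 _ _ (by
    intro i h0 hR hne st
    apply foldl_id_of
    intro j hj s
    have : (i == row) = false := by simp [hne]
    rw [this]
    simp)]
  rw [foldl_once 0 ((pvRowA grid row).length : Int) col hin.2.1 hin.2.2 _ _ (by
    intro j h0 hW hne s
    have : (j == col) = false := by simp [hne]
    rw [this]
    simp)]
  simp

-- ===== VERDICT (by name: the statement is the Claim_ definition above) =====
theorem solution_713_5_1_spec : Claim_equal_solution_713_5_1 := by
  unfold Claim_equal_solution_713_5_1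
  intro grid row col color hDom hPre
  unfold Spec_solution_713_5_1
  by_cases hin : (0 ≤ row ∧ row < (grid.length : Int)) ∧ (0 ≤ col ∧ col < ((pvRowA grid row).length : Int))
  · -- the fill starts in bounds; Pre_ then guarantees a rectangular grid
    have hrect : ∀ r ∈ grid, r.length = (grid.headD []).length := by
      rcases hPre with h | h
      · exact h
      · exact absurd ⟨hin.1.1, hin.1.2, hin.2.1, hin.2.2⟩ h
    set orig := pvAt grid row col with horig
    have hsum : (grid.map List.length).sum = grid.length * (grid.headD []).length :=
      sum_map_len grid _ hrect
    have hOkStart : Ok grid orig (row, col) := ⟨⟨hin.1.1, hin.1.2, hin.2.1, hin.2.2⟩, rfl⟩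
    have postA := dfsA_spec grid orig hrect ((grid.map List.length).sum + 1) row col [] []
      hOkStart List.nodup_nil (by simp) (by rw [hsum]; simp)
    set rA := pvDfsA grid orig ((grid.map List.length).sum + 1) row col [] [] with hrA
    have haddnil : PySem.Set.add ([] : List (Int × Int)) (row, col) = [(row, col)] := rfl
    have memA : ∀ c, c ∈ rA.1 ↔ Reach grid orig (row, col) c := by
      intro c
      constructor
      · intro hc
        rcases postA.reach c hc with h | h
        · simp at h
        · exact h
      · intro h
        induction h with
        | base => exact postA.hcur
        | step h1 hnb hok ih =>
          rename_i c' n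
          by_cases hcs : c' = (row, col)
          · subst hcs; exact postA.closureCur _ hnb hok
          · exact postA.closure c' ih (by rw [haddnil]; simp [hcs]) _ hnb hok
    have hctrA : ∀ p, p ∈ rA.2 ↔ (p ∈ rA.1 ∧ pvCtrA grid orig p.1 p.2 = true) := by
      intro p
      rw [postA.ctr p, haddnil]
      constructor
      · rintro (h | ⟨(rfl | ⟨h1, h2⟩), hc⟩)
        · simp at h
        · exact ⟨postA.hcur, hc⟩
        · exact ⟨h1, hc⟩
      · rintro ⟨h1, hc⟩
        by_cases hps : p = (row, col)
        · exact Or.inr ⟨Or.inl hps, hc⟩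
        · exact Or.inr ⟨Or.inr ⟨h1, by simp [hps]⟩, hc⟩
    have postB := bfs_spec grid orig hrect (row, col) (2 * (grid.map List.length).sum + 1)
      [(row, col)] [(row, col)] (List.nodup_singleton _) (by simpa using hOkStart)
      (fun c hc => hc) (fun c hc hnc => absurd hc hnc)
      (by intro c hc; simp at hc; subst hc; exact Reach.base)
      (by rw [hsum]; simp; omega)
    set rB := pvBfs grid orig (2 * (grid.map List.length).sum + 1) [(row, col)] [(row, col)] with hrB
    have memB : ∀ c, c ∈ rB ↔ Reach grid orig (row, col) c := by
      intro c
      constructor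
      · exact postB.reach c
      · intro h
        induction h with
        | base => exact postB.mono _ (by simp)
        | step h1 hnb hok ih => exact postB.closure _ ih _ hnb hok
    rw [solution_713_5_1_eq, pvLocate_in grid row col color hin]
    rw [← horig, ← hrA]
    dsimp only
    rw [PySem.List.foldl_pyRange_zero_pyGetD' rA.1 ((0 : Int), (0 : Int))
      (fun G c => if PySem.Set.contains rA.2 c then G else pvSet2 G c color) grid]
    have hbody : ∀ c ∈ rA.1, ∀ G,
        (if PySem.Set.contains rA.2 c then G else pvSet2 G c color)
          = (if (!(pvCtrB grid orig c)) then pvSet2 G c color else G) := by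
      intro c hc G
      have hmemc : c ∈ rA.2 ↔ pvCtrB grid orig c = true := by
        rw [hctrA c, ← ctr_eq grid orig hrect c (postA.okAll c hc).1]
        exact ⟨fun h => h.2, fun h => ⟨hc, h⟩⟩
      have h1 : PySem.Set.contains rA.2 c = pvCtrB grid orig c := by
        rw [Bool.eq_iff_iff, PySem.Set.contains_iff]
        exact hmemc
      rw [h1]
      cases pvCtrB grid orig c <;> simp
    have hcongr :
        List.foldl (fun G c => if PySem.Set.contains rA.2 c then G else pvSet2 G c color) grid rA.1
          = List.foldl (fun G c => if (!(pvCtrB grid orig c)) then pvSet2 G c color else G) grid rA.1 :=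
      PySem.List.foldl_congr_mem' _ _ _ _ hbody
    have hfilter :
        List.foldl (fun G c => if (!(pvCtrB grid orig c)) then pvSet2 G c color else G) grid rA.1
          = List.foldl (fun G c => pvSet2 G c color) grid
              (rA.1.filter (fun c => !(pvCtrB grid orig c))) := by
      apply PySem.List.foldl_if_eq_foldl_filter
    rw [hcongr, hfilter]
    simp only [solution_713_5_1_alt]
    rw [if_pos (by simp only [Bool.and_eq_true, decide_eq_true_eq]; exact ⟨hin.1, hin.2⟩)]
    rw [← horig, ← hrB]
    have hperm : List.Perm (rA.1.filter (fun c => !(pvCtrB grid orig c)))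
        (rB.filter (fun c => !(pvCtrB grid orig c))) := by
      rw [List.perm_ext_iff_of_nodup (postA.nodup.filter _) (postB.nodup.filter _)]
      intro a
      simp only [List.mem_filter]
      constructor <;> rintro ⟨h1, h2⟩
      · exact ⟨(memB a).mpr ((memA a).mp h1), h2⟩
      · exact ⟨(memA a).mpr ((memB a).mp h1), h2⟩
    exact hperm.foldl_eq' (fun x hx y hy z => pvSet2_comm z x y color) grid
  · -- out-of-bounds start: both programs leave the grid untouched
    have hB : solution_713_5_1_alt grid row col color = grid := by
      unfold solution_713_5_1_alt
      rw [if_neg (by simp only [Bool.and_eq_true, decide_eq_true_eq]; exact hin)]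
    rw [hB, solution_713_5_1_eq, pvLocate_out grid row col color hin]
    dsimp only
    simp [PySem.List.pyRange_one_eq_nil]
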